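-- pv_equiv track=rewrite | github.com/CodeforBirmingham/Open-Disclosure | utils/CompareYears.py | _sort_by_year
-- ===== SOURCE A (Python) =====
-- def _sort_by_year(records):
--     """
--     Sort the records by filed_year and count the number of records in each year
--     :returns: a tuple of the sorted records and a mapping from years to numbers of records
--     """
--     byYear = {}
--     for record in records:
--         if record['filed_year'] in byYear:
--             byYear[record['filed_year']].append(record)
--         else:
--             byYear[record['filed_year']] = [record]
--     years = list(byYear.keys())
--     years.sort()
--     combined = []
--     setLengths = {}
--     for year in years:
--         setLengths[year] = len(byYear[year])
--         combined += byYear[year]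
--     return (combined, setLengths)
-- ===== SOURCE B (Python) =====
-- def _sort_by_year(records):
--     """Stable-sort the records by filed_year, then count per year in one pass."""
--     combined = sorted(records, key=lambda r: r['filed_year'])
--     counts = {}
--     for r in combined:
--         y = r['filed_year']
--         counts[y] = counts.get(y, 0) + 1
--     return (combined, counts)
-- ===== Notes on version B (the rewrite author's own statement) =====
-- stated objective: simpler
-- what changed: Replaces A's hash-grouping dict + sort of the keys + group concatenation with a single stable sort of the records on the filed_year key followed by one counting pass over the sorted list.
import Mathlib
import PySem

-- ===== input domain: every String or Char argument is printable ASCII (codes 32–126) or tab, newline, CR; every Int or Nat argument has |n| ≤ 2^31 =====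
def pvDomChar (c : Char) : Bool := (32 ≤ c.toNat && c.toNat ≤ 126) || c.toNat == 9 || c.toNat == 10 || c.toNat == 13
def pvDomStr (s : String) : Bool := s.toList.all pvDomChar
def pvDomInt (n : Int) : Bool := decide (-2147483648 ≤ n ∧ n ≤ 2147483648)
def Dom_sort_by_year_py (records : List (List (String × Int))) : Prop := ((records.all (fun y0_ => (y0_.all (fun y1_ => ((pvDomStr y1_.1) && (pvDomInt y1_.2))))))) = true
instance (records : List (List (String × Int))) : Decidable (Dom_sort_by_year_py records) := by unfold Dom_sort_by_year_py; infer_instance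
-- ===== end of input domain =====

-- B replaces A's hash-grouping + key sort + concatenation by one stable sort on the
-- year key followed by a single counting pass over the sorted list (objective: simpler).

-- ===== PORT A =====
-- record['filed_year']: first matching key of the record dict; total form with
-- default 0, exact under Pre_ (the key is present in every record).
def pvYear (r : List (String × Int)) : Int :=
  ((r.find? (fun p => p.1 == "filed_year")).map Prod.snd).getD 0

def sort_by_year_py (records : List (List (String × Int))) : (List (List (String × Int))) × (List (Int × Int)) :=
  let byYear : PySem.Dict Int (List (List (String × Int))) :=
    records.foldl (fun d r =>
      if d.contains (pvYear r) then
        d.insert (pvYear r) (d.getD (pvYear r) [] ++ [r])   -- byYear[y].append(record)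
      else
        d.insert (pvYear r) [r]) PySem.Dict.empty
  let years : List Int := PySem.List.sorted (PySem.Dict.keys byYear) (fun y => y)
  let res :=
    years.foldl (fun s y =>
        (s.1.insert y (PySem.List.len (byYear.getD y [])), s.2 ++ byYear.getD y []))
      ((PySem.Dict.empty : PySem.Dict Int Int), ([] : List (List (String × Int))))
  (res.2, res.1.items)

-- ===== PORT B =====
def sort_by_year_py_alt (records : List (List (String × Int))) : (List (List (String × Int))) × (List (Int × Int)) :=
  let combined := PySem.List.sorted records pvYear
  let counts : PySem.Dict Int Int :=
    combined.foldl (fun d r => d.insert (pvYear r) (d.getD (pvYear r) 0 + 1)) PySem.Dict.empty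
  (combined, counts.items)

-- ===== PRECONDITION & SPEC =====
-- Pre_: every record carries the 'filed_year' key; otherwise Python A raises KeyError.
def Pre_sort_by_year_py (records : List (List (String × Int))) : Prop :=
  ∀ r ∈ records, "filed_year" ∈ r.map Prod.fst
instance (records : List (List (String × Int))) : Decidable (Pre_sort_by_year_py records) := by unfold Pre_sort_by_year_py; infer_instance

def pvWitness_sort_by_year_py : (List (List (String × Int))) :=
  [[("filed_year", 2017), ("amount", 5)], [("filed_year", 2016)], [("filed_year", 2017)]]

def Spec_sort_by_year_py (records : List (List (String × Int))) (out : (List (List (String × Int))) × (List (Int × Int))) : Prop := out = sort_by_year_py_alt records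
instance (records : List (List (String × Int))) (out : (List (List (String × Int))) × (List (Int × Int))) : Decidable (Spec_sort_by_year_py records out) := by unfold Spec_sort_by_year_py; infer_instance

-- ===== CLAIM (what is proved, stated in full; the proofs are below) =====
def Claim_equal_sort_by_year_py : Prop := ∀ (records : List (List (String × Int))), Dom_sort_by_year_py records → Pre_sort_by_year_py records → Spec_sort_by_year_py records (sort_by_year_py records)

-- ===== LEMMAS AND PROOFS =====

-- concatenation of the per-year groups, in the order of the year list ys
def pvGroups {α : Type} (key : α → Int) (xs : List α) (ys : List Int) : List α :=
  ys.flatMap (fun y => xs.filter (fun x => key x == y))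

theorem pvGroups_nil {α : Type} (key : α → Int) (ys : List Int) :
    pvGroups key [] ys = [] := by
  simp [pvGroups]

theorem pvGroups_cons {α : Type} (key : α → Int) (xs : List α) (y : Int) (t : List Int) :
    pvGroups key xs (y :: t) = xs.filter (fun x => key x == y) ++ pvGroups key xs t := by
  simp [pvGroups]

theorem key_mem_of_mem_pvGroups {α : Type} {key : α → Int} {xs : List α} {ys : List Int}
    {e : α} (h : e ∈ pvGroups key xs ys) : key e ∈ ys := by
  simp only [pvGroups, List.mem_flatMap, List.mem_filter] at h
  rcases h with ⟨y, hy, _, hk⟩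
  rw [beq_iff_eq.mp hk]
  exact hy

theorem pvGroups_append_singleton_not_mem {α : Type} (key : α → Int) (xs : List α)
    (x : α) (ys : List Int) (h : key x ∉ ys) :
    pvGroups key (xs ++ [x]) ys = pvGroups key xs ys := by
  induction ys with
  | nil => rfl
  | cons y t ih =>
      have hxy : ¬ (key x = y) := fun he => h (by simp [he])
      rw [pvGroups_cons, pvGroups_cons, ih (fun hm => h (by simp [hm]))]
      congr 1
      simp [List.filter_append, hxy]

theorem insertBy_append {α : Type} (before : α → α → Bool) (x : α) (l1 l2 : List α)
    (h : ∀ e ∈ l1, before x e = false) :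
    PySem.List.insertBy before x (l1 ++ l2) = l1 ++ PySem.List.insertBy before x l2 := by
  induction l1 with
  | nil => rfl
  | cons e t ih =>
      have he : before x e = false := h e (by simp)
      simp [PySem.List.insertBy, he, ih (fun e' he' => h e' (by simp [he']))]

theorem insertBy_of_forall_before {α : Type} (before : α → α → Bool) (x : α) (l : List α)
    (h : ∀ e ∈ l, before x e = true) :
    PySem.List.insertBy before x l = x :: l := by
  cases l with
  | nil => rfl
  | cons e t => simp [PySem.List.insertBy, h e (by simp)]

theorem insertBy_pvGroups {α : Type} (key : α → Int) (x : α) (xs : List α) (ys : List Int)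
    (hys : ys.Pairwise (· < ·)) (hx : key x ∈ ys) :
    PySem.List.insertBy (fun a b => decide (key a < key b)) x (pvGroups key xs ys)
      = pvGroups key (xs ++ [x]) ys := by
  induction ys with
  | nil => cases hx
  | cons y t ih =>
      have hlt : ∀ z ∈ t, y < z := by
        intro z hz; exact (List.pairwise_cons.mp hys).1 z hz
      have hyt : y ∉ t := fun hm => lt_irrefl y (hlt y hm)
      by_cases hk : key x = y
      · have h1 : ∀ e ∈ xs.filter (fun z => key z == y), (fun a b => decide (key a < key b)) x e = false := by
          intro e he
          have : key e = y := by
            have := (List.mem_filter.mp he).2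
            exact beq_iff_eq.mp this
          simp [this, hk]
        have h2 : ∀ e ∈ pvGroups key xs t, (fun a b => decide (key a < key b)) x e = true := by
          intro e he
          have hkey := key_mem_of_mem_pvGroups he
          simp [hk]
          exact hlt _ hkey
        rw [pvGroups_cons, pvGroups_cons,
          insertBy_append _ _ _ _ h1, insertBy_of_forall_before _ _ _ h2]
        have hnot : key x ∉ t := by rw [hk]; exact hyt
        rw [← pvGroups_append_singleton_not_mem key xs x t hnot]
        simp [List.filter_append, hk]
      · have hxt : key x ∈ t := by
          rcases List.mem_cons.mp hx with h | h
          · exact absurd h hk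
          · exact h
        have hylt : y < key x := hlt _ hxt
        have h1 : ∀ e ∈ xs.filter (fun z => key z == y), (fun a b => decide (key a < key b)) x e = false := by
          intro e he
          have : key e = y := by
            have := (List.mem_filter.mp he).2
            exact beq_iff_eq.mp this
          simp [this]
          omega
        rw [pvGroups_cons, pvGroups_cons,
          insertBy_append _ _ _ _ h1, ih (List.pairwise_cons.mp hys).2 hxt]
        simp [List.filter_append, hk]

-- a stable sort by an Int key is the concatenation of the per-key groups, keys ascending
theorem sorted_eq_pvGroups {α : Type} (key : α → Int) (xs : List α) (ys : List Int)
    (hys : ys.Pairwise (· < ·)) (hmem : ∀ x ∈ xs, key x ∈ ys) :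
    PySem.List.sorted xs key = pvGroups key xs ys := by
  induction xs using List.reverseRecOn with
  | nil => rw [PySem.List.sorted_eq_foldl_insertBy]; simp [pvGroups_nil]
  | append_singleton xs x ih =>
      rw [PySem.List.sorted_eq_foldl_insertBy, List.foldl_append, List.foldl_cons, List.foldl_nil,
        ← PySem.List.sorted_eq_foldl_insertBy,
        ih (fun z hz => hmem z (by simp [hz]))]
      exact insertBy_pvGroups key x xs ys hys (hmem x (by simp))

theorem foldl_set_add_sublist {α : Type} [BEq α] (l : List α) :
    ∀ s : List α, ∃ t, List.foldl PySem.Set.add s l = s ++ t ∧ t.Sublist l := by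
  induction l with
  | nil => intro s; exact ⟨[], by simp⟩
  | cons x l ih =>
      intro s
      rcases ih (PySem.Set.add s x) with ⟨t, ht, hs⟩
      by_cases h : PySem.Set.contains s x = true
      · refine ⟨t, ?_, hs.cons x⟩
        simp only [List.foldl_cons]
        rw [ht]
        simp [PySem.Set.add, PySem.Set.contains] at h ⊢
        simp [h]
      · refine ⟨x :: t, ?_, hs.cons₂ x⟩
        simp only [List.foldl_cons]
        rw [ht]
        simp [PySem.Set.add, PySem.Set.contains] at h ⊢
        simp [h]

theorem set_ofList_sublist {α : Type} [BEq α] (l : List α) :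
    (PySem.Set.ofList l).Sublist l := by
  rcases foldl_set_add_sublist l [] with ⟨t, ht, hs⟩
  simpa [PySem.Set.ofList, PySem.Set.empty, ht] using hs

-- A's grouping loop body is a dict 'modify'
theorem stepA_eq (d : PySem.Dict Int (List (List (String × Int)))) (r : List (String × Int)) :
    (if d.contains (pvYear r) then
        d.insert (pvYear r) (d.getD (pvYear r) [] ++ [r])
      else
        d.insert (pvYear r) [r])
      = d.modify (pvYear r) [] (fun v => v ++ [r]) := by
  by_cases h : d.contains (pvYear r) = true
  · simp [h, PySem.Dict.modify]
  · have h' : d.contains (pvYear r) = false := by simpa using h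
    simp [h', PySem.Dict.modify, PySem.Dict.getD_of_not_contains d ([] : List (List (String × Int))) h']

-- ===== VERDICT (by name: the statement is the Claim_ definition above) =====
theorem sort_by_year_py_spec : Claim_equal_sort_by_year_py := by
  intro records _ _
  unfold Spec_sort_by_year_py sort_by_year_py sort_by_year_py_alt
  dsimp only
  -- the grouping dict, rewritten to a 'modify' fold
  have hG : records.foldl (fun d r =>
      if d.contains (pvYear r) then
        d.insert (pvYear r) (d.getD (pvYear r) [] ++ [r])
      else
        d.insert (pvYear r) [r]) PySem.Dict.empty
      = records.foldl (fun d r => d.modify (pvYear r) [] (fun v => v ++ [r])) PySem.Dict.empty :=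
    PySem.List.foldl_congr_mem records _ _ _ (fun d r _ => stepA_eq d r)
  set G := records.foldl (fun d r => d.modify (pvYear r) [] (fun v => v ++ [r])) PySem.Dict.empty with hGdef
  rw [hG]
  -- G's lookups are the per-year groups
  have hget : ∀ c : Int, G.getD c [] = records.filter (fun r => pvYear r == c) := by
    intro c
    have hmap : G = (records.map (fun r => (pvYear r, r))).foldl
        (fun d p => d.modify p.1 [] (fun v => v ++ [p.2])) PySem.Dict.empty := by
      rw [hGdef, List.foldl_map]
    rw [hmap, PySem.Dict.getD_foldl_modify_append]
    simp [List.filter_map, List.map_map, Function.comp_def]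
  -- G's keys
  have hkeys : G.keys = PySem.Set.ofList (records.map pvYear) := by
    rw [hGdef, PySem.Dict.keys_foldl_modify_key records pvYear [] (fun _ r v => v ++ [r])]
    simp [PySem.Set.update, PySem.Set.ofList, PySem.Set.empty]
  set years := PySem.List.sorted (PySem.Dict.keys G) (fun y => y) with hyearsdef
  have hyears : years = PySem.List.sorted (PySem.Set.ofList (records.map pvYear)) (fun y => y) := by
    rw [hyearsdef, hkeys]
  have hyslt : years.Pairwise (· < ·) := by
    rw [hyears]; exact PySem.List.sorted_ofList_pairwise_lt _
  have hysnd : years.Nodup := hyslt.imp (fun h => ne_of_lt h)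
  have hysmem : ∀ r ∈ records, pvYear r ∈ years := by
    intro r hr
    rw [hyears, PySem.List.mem_sorted, PySem.Set.mem_ofList]
    exact List.mem_map_of_mem hr
  -- split A's final loop into its two accumulators
  rw [PySem.List.foldl_prod_mk
    (f := fun (d : PySem.Dict Int Int) (y : Int) => d.insert y (PySem.List.len (G.getD y [])))
    (g := fun (c : List (List (String × Int))) (y : Int) => c ++ G.getD y [])]
  -- combined sides
  have hcombined : years.foldl (fun c y => c ++ G.getD y []) [] = PySem.List.sorted records pvYear := by
    rw [PySem.List.foldl_append_eq_flatMap, List.nil_append,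
      sorted_eq_pvGroups pvYear records years hyslt hysmem]
    unfold pvGroups
    apply List.flatMap_congr
    intro y _
    rw [hget y]
  -- A's per-year lengths
  have hitemsA : (years.foldl (fun (d : PySem.Dict Int Int) (y : Int) =>
        d.insert y (PySem.List.len (G.getD y []))) PySem.Dict.empty).items
      = years.map (fun y => (y, PySem.List.len (G.getD y []))) := by
    have := PySem.Dict.items_foldl_insert_fresh years (fun (y : Int) => y)
      (fun y => PySem.List.len (G.getD y [])) PySem.Dict.empty
      (fun a _ => by simp [pysem]) (by simpa using hysnd)
    simpa using this
  -- B's counting loop is Counter over the years of the sorted list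
  have hfold : (PySem.List.sorted records pvYear).foldl
      (fun d r => d.insert (pvYear r) (d.getD (pvYear r) 0 + 1)) PySem.Dict.empty
      = PySem.Dict.counter ((PySem.List.sorted records pvYear).map pvYear) := by
    rw [← PySem.Dict.foldl_insert_getD_add_one_eq_counter, List.foldl_map]
  set m := (PySem.List.sorted records pvYear).map pvYear with hm
  have hmle : m.Pairwise (· ≤ ·) := PySem.List.sorted_map_key_pairwise records pvYear
  have hperm : (PySem.List.sorted records pvYear).Perm records :=
    PySem.List.sorted_perm records pvYear false
  have hofm : years = PySem.Set.ofList m := by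
    rw [hyears]
    apply PySem.List.sorted_eq_of_perm_of_pairwise_lt
    · rw [List.perm_ext_iff_of_nodup (PySem.Set.nodup_ofList m) (PySem.Set.nodup_ofList _)]
      intro a
      rw [PySem.Set.mem_ofList, PySem.Set.mem_ofList, hm]
      exact ⟨fun h => List.mem_map.mpr (by
          rcases List.mem_map.mp h with ⟨r, hr, hra⟩
          exact ⟨r, hperm.mem_iff.mp hr, hra⟩),
        fun h => List.mem_map.mpr (by
          rcases List.mem_map.mp h with ⟨r, hr, hra⟩
          exact ⟨r, hperm.mem_iff.mpr hr, hra⟩)⟩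
    · have h1 : (PySem.Set.ofList m).Pairwise (· ≤ ·) := hmle.sublist (set_ofList_sublist m)
      have h2 : (PySem.Set.ofList m).Pairwise (· ≠ ·) := PySem.Set.nodup_ofList m
      exact (h1.and h2).imp (fun h => lt_of_le_of_ne h.1 h.2)
  have hcount : ∀ y : Int, ((List.count y m : Nat) : Int) = PySem.List.len (G.getD y []) := by
    intro y
    have hc : List.count y m = (records.filter (fun r => pvYear r == y)).length := by
      rw [hm, List.count_eq_countP, List.countP_map, hperm.countP_eq, List.countP_eq_length_filter]
      congr 1
    rw [hget y, PySem.List.len_eq, hc]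
  simp only [Prod.mk.injEq]
  refine ⟨hcombined, ?_⟩
  rw [hitemsA, hfold, PySem.Dict.items_counter, ← hofm]
  refine List.map_congr_left (fun y hy => ?_)
  rw [hcount y]
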